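-- pv_equiv track=rewrite | github.com/yijencheng/Leetcode | 20230523OA/1.py | solution
-- ===== SOURCE A (Python) =====
-- import collections
--
-- def solution(A):
--     # Implement your solution here
--     counter = collections.Counter(A)
--     s = []
--     for k in counter:
--         s.append(counter[k])
--     s = sorted(s)
--
--     remove = 0
--     upperbound = s[-1]
--     for i in range(len(s)-2, -1, -1):
--         cur = s[i]
--         if upperbound == 0:
--           remove+= cur
--         elif cur < upperbound:
--             upperbound = cur
--         else:
--             remove+=(cur-upperbound+1)
--             upperbound-=1
--
--     return remove
-- ===== SOURCE B (Python) =====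
-- import collections
--
-- def solution(A):
--     counter = collections.Counter(A)
--     used = set()
--     remove = 0
--     for f in sorted(counter.values(), reverse=True):
--         while f > 0 and f in used:
--             f -= 1
--             remove += 1
--         used.add(f)
--     return remove
-- ===== Notes on version B (the rewrite author's own statement) =====
-- stated objective: alternative
-- what changed: B replaces A's ascending sort plus reversed-index upperbound sweep by a descending sort with a 'used frequencies' set that is probed downward for each frequency; Pre_ excludes only the empty list, on which A raises IndexError (indexing the last element of the empty frequency list) and B returns 0.
import Mathlib
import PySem

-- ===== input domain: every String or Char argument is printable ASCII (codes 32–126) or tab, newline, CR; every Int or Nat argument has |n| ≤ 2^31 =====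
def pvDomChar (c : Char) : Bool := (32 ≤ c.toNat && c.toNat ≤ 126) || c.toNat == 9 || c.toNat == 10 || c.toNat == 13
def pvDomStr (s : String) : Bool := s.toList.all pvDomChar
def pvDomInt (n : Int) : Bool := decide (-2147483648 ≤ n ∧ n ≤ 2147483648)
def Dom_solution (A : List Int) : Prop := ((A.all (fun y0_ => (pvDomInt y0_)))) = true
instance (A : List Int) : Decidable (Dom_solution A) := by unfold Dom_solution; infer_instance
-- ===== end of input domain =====

-- B replaces A's ascending sort + reversed-index upperbound sweep by a descending sort with a
-- 'used frequencies' set probed downward (objective: alternative); on the empty list A raises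
-- IndexError indexing the last element of the empty frequency list while B returns 0, so Pre_ excludes exactly the empty list.

-- ===== PORT A =====
def solution (A : List Int) : Int :=
  let counter := PySem.Dict.counter A
  let s : List Int := counter.keys.foldl (fun s k => s ++ [counter.getD k 0]) []
  let s := PySem.List.sorted s (fun x => x) false
  let remove : Int := 0
  let upperbound : Int := PySem.List.pyGetD s (-1) 0
  let res := (PySem.List.pyRange ((s.length : Int) - 2) (-1) (-1)).foldl
    (fun (acc : Int × Int) i =>
      let cur := PySem.List.pyGetD s i 0
      if acc.2 = 0 then (acc.1 + cur, acc.2)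
      else if cur < acc.2 then (acc.1, cur)
      else (acc.1 + (cur - acc.2 + 1), acc.2 - 1))
    (remove, upperbound)
  res.1

-- ===== PORT B =====
-- the inner 'while f > 0 and f in used: f -= 1; remove += 1' loop of Source B
def probeDown (used : PySem.Set Int) (f remove : Int) : Int × Int :=
  if h : 0 < f ∧ PySem.Set.contains used f = true then probeDown used (f - 1) (remove + 1)
  else (f, remove)
termination_by f.toNat
decreasing_by omega

def solution_alt (A : List Int) : Int :=
  let counter := PySem.Dict.counter A
  let res := (PySem.List.sorted counter.values (fun x => x) true).foldl
    (fun (acc : PySem.Set Int × Int) f =>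
      let fr := probeDown acc.1 f acc.2
      (PySem.Set.add acc.1 fr.1, fr.2))
    (PySem.Set.empty, 0)
  res.2

-- ===== PRECONDITION & SPEC =====
-- A indexes the last frequency; on the empty list this raises IndexError, so Pre_ excludes exactly the empty list.
def Pre_solution (A : List Int) : Prop := A ≠ []
instance (A : List Int) : Decidable (Pre_solution A) := by unfold Pre_solution; infer_instance
def pvWitness_solution : List Int := [1, 2, 2]

def Spec_solution (A : List Int) (out : Int) : Prop := out = solution_alt A
instance (A : List Int) (out : Int) : Decidable (Spec_solution A out) := by unfold Spec_solution; infer_instance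

-- ===== CLAIM (what is proved, stated in full; the proofs are below) =====
def Claim_equal_solution : Prop := ∀ (A : List Int), Dom_solution A → Pre_solution A → Spec_solution A (solution A)

-- ===== LEMMAS AND PROOFS =====

-- A's loop body / B's loop body, abstracted
def stepA (acc : Int × Int) (cur : Int) : Int × Int :=
  if acc.2 = 0 then (acc.1 + cur, acc.2)
  else if cur < acc.2 then (acc.1, cur)
  else (acc.1 + (cur - acc.2 + 1), acc.2 - 1)

def stepB (acc : PySem.Set Int × Int) (f : Int) : PySem.Set Int × Int :=
  let fr := probeDown acc.1 f acc.2
  (PySem.Set.add acc.1 fr.1, fr.2)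

-- the probe loop walks from f down to the first t with t = 0 or t ∉ used, provided everything above t is in used
lemma probeDown_spec (S : PySem.Set Int) (t : Int) (ht0 : 0 ≤ t)
    (hstop : t = 0 ∨ t ∉ S) :
    ∀ (n : Nat) (rem : Int), (∀ v : Int, t < v → v ≤ t + n → v ∈ S) →
      probeDown S (t + n) rem = (t, rem + n) := by
  intro n
  induction n with
  | zero =>
      intro rem _
      rw [probeDown]
      have : ¬ (0 < t + (0:Nat) ∧ PySem.Set.contains S (t + (0:Nat)) = true) := by
        push_cast
        rcases hstop with h | h
        · omega
        · rintro ⟨_, hc⟩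
          exact h ((PySem.Set.contains_iff S t).1 (by simpa using hc))
      rw [dif_neg this]
      simp
  | succ n ih =>
      intro rem hmem
      rw [probeDown]
      have hmemS : (t + (n+1 : Nat)) ∈ S := by
        apply hmem <;> push_cast <;> omega
      have hpos : 0 < t + ((n+1 : Nat) : Int) := by push_cast; omega
      rw [dif_pos ⟨hpos, (PySem.Set.contains_iff S _).2 hmemS⟩]
      have harg : t + ((n+1 : Nat) : Int) - 1 = t + (n : Nat) := by push_cast; ring
      rw [harg, ih (rem + 1) (fun v hv1 hv2 => hmem v hv1 (by push_cast at hv2 ⊢; omega))]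
      congr 1; push_cast; ring

-- main loop invariant: B's set-greedy over a descending list tracks A's upperbound sweep
lemma probeDown_eq (S : PySem.Set Int) (t f rem : Int) (ht0 : 0 ≤ t) (htf : t ≤ f)
    (hstop : t = 0 ∨ t ∉ S) (hmem : ∀ v : Int, t < v → v ≤ f → v ∈ S) :
    probeDown S f rem = (t, rem + (f - t)) := by
  have hspec := probeDown_spec S t ht0 hstop (f - t).toNat rem
    (fun v h1 h2 => hmem v h1 (by omega))
  have hn : t + (((f - t).toNat : Nat) : Int) = f := by omega
  rw [hn] at hspec
  rw [hspec]
  congr 1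
  omega

lemma mainLoop (l : List Int) : ∀ (S : PySem.Set Int) (u rem m : Int),
    (∀ x ∈ S, u ≤ x) →
    (∀ v : Int, u ≤ v → v ≤ m → v ∈ S) →
    0 ≤ u → u ≤ m →
    (∀ f ∈ l, 0 ≤ f ∧ f ≤ m) →
    l.Pairwise (fun a b => b ≤ a) →
    (l.foldl stepB (S, rem)).2 = (l.foldl stepA (rem, u)).1 := by
  induction l with
  | nil => intros; rfl
  | cons f t ih =>
      intro S u rem m hSlb hint hu0 hum hl hdesc
      obtain ⟨hf0, hfm⟩ := hl f (List.mem_cons_self ..)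
      obtain ⟨hft, hdt⟩ := List.pairwise_cons.1 hdesc
      simp only [List.foldl_cons]
      by_cases hu : u = 0
      · subst hu
        have hp : probeDown S f rem = (0, rem + (f - 0)) :=
          probeDown_eq S 0 f rem le_rfl hf0 (Or.inl rfl)
            (fun v h1 h2 => hint v (by omega) (by omega))
        have h0S : (0:Int) ∈ S := hint 0 le_rfl hum
        have hB : stepB (S, rem) f = (S, rem + f) := by
          simp only [stepB, hp, PySem.Set.add_of_mem h0S]
          congr 1
          omega
        have hA : stepA (rem, (0:Int)) f = (rem + f, 0) := by
          simp [stepA]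
        rw [hB, hA]
        exact ih S 0 (rem + f) f hSlb (fun v h1 h2 => hint v h1 (by omega)) le_rfl hf0
          (fun g hg => ⟨(hl g (List.mem_cons_of_mem _ hg)).1, hft g hg⟩) hdt
      · by_cases hfu : f < u
        · have hfS : f ∉ S := fun hmem => by have := hSlb f hmem; omega
          have hp : probeDown S f rem = (f, rem + (f - f)) :=
            probeDown_eq S f f rem hf0 le_rfl (Or.inr hfS) (fun v h1 h2 => by omega)
          have hB : stepB (S, rem) f = (PySem.Set.add S f, rem) := by
            simp only [stepB, hp]
            congr 1
            omega
          have hA : stepA (rem, u) f = (rem, f) := by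
            simp [stepA, hu, hfu]
          rw [hB, hA]
          refine ih (PySem.Set.add S f) f rem f ?_ ?_ hf0 le_rfl
            (fun g hg => ⟨(hl g (List.mem_cons_of_mem _ hg)).1, hft g hg⟩) hdt
          · intro x hx
            rcases (PySem.Set.mem_add S f x).1 hx with hx | hx
            · have := hSlb x hx; omega
            · omega
          · intro v h1 h2
            have hv : v = f := by omega
            exact (PySem.Set.mem_add S f v).2 (Or.inr hv)
        · have htS : u - 1 ∉ S := fun hmem => by have := hSlb _ hmem; omega
          have hp : probeDown S f rem = (u - 1, rem + (f - (u - 1))) :=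
            probeDown_eq S (u - 1) f rem (by omega) (by omega) (Or.inr htS)
              (fun v h1 h2 => hint v (by omega) (by omega))
          have hB : stepB (S, rem) f = (PySem.Set.add S (u - 1), rem + (f - u + 1)) := by
            simp only [stepB, hp]
            congr 1
            omega
          have hA : stepA (rem, u) f = (rem + (f - u + 1), u - 1) := by
            simp [stepA, hu, hfu]
          rw [hB, hA]
          refine ih (PySem.Set.add S (u - 1)) (u - 1) (rem + (f - u + 1)) f ?_ ?_ (by omega)
            (by omega) (fun g hg => ⟨(hl g (List.mem_cons_of_mem _ hg)).1, hft g hg⟩) hdt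
          · intro x hx
            rcases (PySem.Set.mem_add S (u - 1) x).1 hx with hx | hx
            · have := hSlb x hx; omega
            · omega
          · intro v h1 h2
            rcases eq_or_lt_of_le h1 with hv | hv
            · exact (PySem.Set.mem_add S (u - 1) v).2 (Or.inr hv.symm)
            · exact (PySem.Set.mem_add S (u - 1) v).2
                (Or.inl (hint v (by omega) (by omega)))

-- counter values are counts of members of A, hence nonnegative
lemma vals_nonneg (A : List Int) : ∀ x ∈ (PySem.Dict.counter A).values, (0:Int) ≤ x := by
  intro x hx
  simp only [PySem.Dict.values, PySem.Dict.items_counter, List.map_map, List.mem_map] at hx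
  obtain ⟨k, _, hk⟩ := hx
  simp at hk
  omega

lemma vals_ne_nil (A : List Int) (h : A ≠ []) : (PySem.Dict.counter A).values ≠ [] := by
  simp only [PySem.Dict.values, PySem.Dict.items_counter, List.map_map, ne_eq, List.map_eq_nil_iff]
  obtain ⟨a, t, rfl⟩ := List.exists_cons_of_ne_nil h
  rw [PySem.Set.ofList_cons]
  simp

-- A's s-building loop is exactly counter.values
lemma build_s_eq_values (A : List Int) :
    (PySem.Dict.counter A).keys.foldl (fun s k => s ++ [(PySem.Dict.counter A).getD k 0]) []
      = (PySem.Dict.counter A).values := by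
  rw [PySem.List.foldl_append_singleton_eq_map,
    PySem.Dict.values_eq_map_keys _ (PySem.Dict.nodup_keys_counter A) 0]
  simp

-- sorted(xs, reverse=True) is the reverse of sorted(xs) for Int with identity key
lemma sorted_rev_eq_reverse (xs : List Int) :
    PySem.List.sorted xs (fun x => x) true = (PySem.List.sorted xs (fun x => x) false).reverse := by
  have h2 : ((PySem.List.sorted xs (fun x => x) true).reverse).Pairwise (fun a b : Int => a ≤ b) := by
    rw [List.pairwise_reverse]
    exact PySem.List.sorted_pairwise_rev xs (fun x => x)
  have hp : ((PySem.List.sorted xs (fun x => x) true).reverse).Perm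
      (PySem.List.sorted xs (fun x => x) false) :=
    (((PySem.List.sorted xs _ true).reverse_perm).trans (PySem.List.sorted_perm ..)).trans
      (PySem.List.sorted_perm xs _ false).symm
  have := PySem.List.eq_of_perm_of_pairwise_le_of_injective (fun x : Int => x)
    (fun a b h => h) hp h2 (PySem.List.sorted_pairwise xs (fun x => x))
  rw [← this, List.reverse_reverse]

-- A's reversed index loop over the ascending list is a fold over reverse (dropLast asc)
lemma sweep_eq_fold_reverse (asc : List Int) (init : Int × Int) :
    (PySem.List.pyRange ((asc.length : Int) - 2) (-1) (-1)).foldl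
        (fun acc i => stepA acc (PySem.List.pyGetD asc i 0)) init
      = (asc.dropLast.reverse).foldl stepA init := by
  have hr : PySem.List.pyRange ((asc.length : Int) - 2) (-1) (-1)
      = (PySem.List.pyRange 0 ((asc.length : Int) - 1) 1).reverse := by
    rw [PySem.List.pyRange_neg_one_eq_reverse]
    have h : (asc.length : Int) - 2 + 1 = (asc.length : Int) - 1 := by ring
    norm_num [h]
  rw [hr, ← List.foldl_map (g := stepA) (f := fun i => PySem.List.pyGetD asc i 0),
    List.map_reverse]
  have hmap : (PySem.List.pyRange 0 ((asc.length : Int) - 1) 1).map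
        (fun i => PySem.List.pyGetD asc i 0) = asc.dropLast := by
    rcases asc with _ | ⟨a, t⟩
    · simp [PySem.List.pyRange]
    · have hlen : ((a :: t).length : Int) - 1 = (((a :: t).dropLast.length : Nat) : Int) := by
        simp
      rw [hlen]
      rw [List.map_congr_left (f := fun i => PySem.List.pyGetD (a :: t) i 0)
        (g := fun i => PySem.List.pyGetD ((a :: t).dropLast) i 0) ?_]
      · exact PySem.List.map_pyGetD_pyRange_zero' ((a :: t).dropLast) 0
      · intro j hj
        rw [PySem.List.mem_pyRange_one] at hj
        obtain ⟨hj0, hj1⟩ := hj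
        have hjlt : j < ((a :: t).dropLast.length : Int) := hj1
        simp only []
        rw [PySem.List.pyGetD_eq_getElem _ _ hj0 (by simp at hjlt ⊢; omega),
            PySem.List.pyGetD_eq_getElem _ _ hj0 (by exact_mod_cast hjlt)]
        exact (List.getElem_dropLast ..).symm
  rw [hmap]

theorem solution_eq_alt (A : List Int) (hPre : A ≠ []) : solution A = solution_alt A := by
  have hne : (PySem.Dict.counter A).values ≠ [] := vals_ne_nil A hPre
  have hA : solution A =
      ((PySem.List.pyRange (((PySem.List.sorted (PySem.Dict.counter A).values (fun x => x) false).length : Int) - 2) (-1) (-1)).foldl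
        (fun acc i => stepA acc (PySem.List.pyGetD (PySem.List.sorted (PySem.Dict.counter A).values (fun x => x) false) i 0))
        (0, PySem.List.pyGetD (PySem.List.sorted (PySem.Dict.counter A).values (fun x => x) false) (-1) 0)).1 := by
    simp only [solution, build_s_eq_values]
    rfl
  have hB : solution_alt A =
      ((PySem.List.sorted (PySem.Dict.counter A).values (fun x => x) true).foldl stepB
        (PySem.Set.empty, 0)).2 := by
    simp only [solution_alt]
    rfl
  rw [hA, hB]
  set vals := (PySem.Dict.counter A).values with hv
  set asc := PySem.List.sorted vals (fun x => x) false with ha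
  have hascne : asc ≠ [] := fun h => hne (by rwa [ha, PySem.List.sorted_eq_nil_iff] at h)
  rw [sweep_eq_fold_reverse asc, sorted_rev_eq_reverse, ← ha]
  rw [PySem.List.pyGetD_neg_one asc 0 hascne]
  have hsplit : asc.reverse = asc.getLast hascne :: asc.dropLast.reverse := by
    conv_lhs => rw [← List.dropLast_append_getLast hascne]
    simp
  rw [hsplit, List.foldl_cons]
  have hstep1 : stepB (PySem.Set.empty, 0) (asc.getLast hascne)
      = (PySem.Set.add PySem.Set.empty (asc.getLast hascne), 0) := by
    simp only [stepB]
    rw [probeDown]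
    simp [PySem.Set.empty, PySem.Set.contains]
  rw [hstep1]
  have hnn : ∀ x ∈ asc, (0:Int) ≤ x := fun x hx =>
    vals_nonneg A x ((PySem.List.mem_sorted ..).1 hx)
  have hlast0 : (0:Int) ≤ asc.getLast hascne :=
    hnn _ (List.getLast_mem hascne)
  have hpair : asc.Pairwise (fun a b : Int => a ≤ b) := PySem.List.sorted_pairwise vals (fun x => x)
  have hpair' : (asc.dropLast ++ [asc.getLast hascne]).Pairwise (fun a b : Int => a ≤ b) := by
    rwa [List.dropLast_append_getLast hascne]
  have hle_last : ∀ g ∈ asc.dropLast, g ≤ asc.getLast hascne := fun g hg =>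
    (List.pairwise_append.1 hpair').2.2 g hg _ (List.mem_singleton_self _)
  refine (mainLoop asc.dropLast.reverse (PySem.Set.add PySem.Set.empty (asc.getLast hascne))
    (asc.getLast hascne) 0 (asc.getLast hascne) ?_ ?_ hlast0 le_rfl ?_ ?_).symm
  · intro x hx
    rcases (PySem.Set.mem_add _ _ x).1 hx with hx | hx
    · simp [PySem.Set.empty] at hx
    · omega
  · intro v h1 h2
    have : v = asc.getLast hascne := le_antisymm h2 h1
    exact (PySem.Set.mem_add _ _ v).2 (Or.inr this)
  · intro g hg
    rw [List.mem_reverse] at hg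
    exact ⟨hnn g (((List.dropLast_sublist asc).mem hg)), hle_last g hg⟩
  · rw [List.pairwise_reverse]
    exact (hpair.sublist (List.dropLast_sublist asc)).imp (fun h => h)

-- ===== VERDICT (by name: the statement is the Claim_ definition above) =====
theorem solution_spec : Claim_equal_solution := by
  intro A _ hPre
  exact solution_eq_alt A hPre
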